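-- pv_equiv track=rewrite | github.com/PremskiSG/vsdh | create_comprehensive_slug_database.py | generate_range_slugs
-- ===== SOURCE A (Python) =====
-- import itertools
-- import string
--
-- def generate_range_slugs(start_range, end_range, max_count=1000):
--     """Generate individual slugs within a range (limited for performance)"""
--     charset = string.digits + string.ascii_lowercase
--     slugs = []
--     count = 0
--
--     for combo in itertools.product(charset, repeat=5):
--         slug = ''.join(combo)
--
--         if slug < start_range:
--             continue
--         if slug > end_range:
--             break
--
--         slugs.append(slug)
--         count += 1
--
--         # Limit to prevent memory issues with large ranges
--         if count >= max_count:
--             break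
--
--     return slugs
-- ===== SOURCE B (Python) =====
-- import string
--
-- def generate_range_slugs(start_range, end_range, max_count=1000):
--     """Generate individual slugs within a range (limited for performance)"""
--     charset = string.digits + string.ascii_lowercase
--     total = 36 ** 5
--
--     def encode(i):
--         chars = []
--         for _ in range(5):
--             i, d = divmod(i, 36)
--             chars.append(charset[d])
--         return ''.join(reversed(chars))
--
--     # Binary search for the first of the 36^5 ordered slugs that is >= start_range.
--     lo, hi = 0, total
--     while lo < hi:
--         mid = (lo + hi) // 2
--         if encode(mid) < start_range:
--             lo = mid + 1
--         else:
--             hi = mid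
--     # Collect consecutive slugs from there.
--     slugs = []
--     i = lo
--     while i < total:
--         slug = encode(i)
--         if slug > end_range:
--             break
--         slugs.append(slug)
--         if len(slugs) >= max_count:
--             break
--         i += 1
--     return slugs
-- ===== Notes on version B (the rewrite author's own statement) =====
-- stated objective: faster
-- what changed: A linearly scans all 36^5 five-char slugs from '00000' until it reaches start_range; B binary-searches the index of the first slug >= start_range among the lexicographically ordered 36^5 slugs and then emits consecutive base-36-encoded slugs from that index.
import Mathlib
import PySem

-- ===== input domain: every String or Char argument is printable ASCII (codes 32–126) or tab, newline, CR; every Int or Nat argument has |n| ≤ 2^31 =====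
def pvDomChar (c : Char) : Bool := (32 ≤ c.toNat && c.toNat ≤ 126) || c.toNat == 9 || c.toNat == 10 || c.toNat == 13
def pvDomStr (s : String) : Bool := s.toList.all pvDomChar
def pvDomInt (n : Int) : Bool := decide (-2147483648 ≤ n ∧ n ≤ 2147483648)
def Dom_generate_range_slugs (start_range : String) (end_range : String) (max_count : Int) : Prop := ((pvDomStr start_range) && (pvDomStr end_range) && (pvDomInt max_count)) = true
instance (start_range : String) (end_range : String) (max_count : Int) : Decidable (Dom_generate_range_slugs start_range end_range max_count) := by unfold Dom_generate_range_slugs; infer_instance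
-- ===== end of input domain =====

-- B replaces A's linear scan over all 36^5 slugs up to the range start by a binary
-- search for the first slug ≥ start_range, then emits consecutive slugs (objective: faster).

-- ===== PORT A =====
-- Python string '<'/'>' is code-point lexicographic; ported exactly, by hand, on char lists.
def pvStrLt : List Char → List Char → Bool
  | _, [] => false
  | [], _ :: _ => true
  | a :: s, b :: t =>
    if a.toNat < b.toNat then true
    else if b.toNat < a.toNat then false
    else pvStrLt s t

-- the k-th character of the charset string.digits + string.ascii_lowercase
def pvChar36 (d : Nat) : Char := if d < 10 then Char.ofNat (48 + d) else Char.ofNat (87 + d)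

-- the i-th tuple of itertools.product(charset, repeat=5), joined: the 5 base-36 digits of i
def pvEncode (i : Nat) : List Char :=
  [pvChar36 (i / 1679616 % 36), pvChar36 (i / 46656 % 36), pvChar36 (i / 1296 % 36),
   pvChar36 (i / 36 % 36), pvChar36 (i % 36)]

-- A's for-loop over the lazy product stream (fuel = remaining tuples), with continue/break.
def pvALoop (s e : List Char) (m : Int) : Nat → Nat → Int → List String
  | 0, _, _ => []
  | fuel + 1, i, count =>
    let slug := pvEncode i
    if pvStrLt slug s then pvALoop s e m fuel (i + 1) count
    else if pvStrLt e slug then []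
    else String.ofList slug ::
      (if m ≤ count + 1 then [] else pvALoop s e m fuel (i + 1) (count + 1))

def generate_range_slugs (start_range : String) (end_range : String) (max_count : Int) : List String :=
  pvALoop start_range.toList end_range.toList max_count 60466176 0 0

-- ===== PORT B =====
-- Source B's encode(i): five divmod steps, building the 5 chars back-to-front
def pvEncB : Nat → Nat → List Char → List Char
  | 0, _, acc => acc
  | k + 1, n, acc => pvEncB k (n / 36) (pvChar36 (n % 36) :: acc)

-- Source B's binary search: least index whose slug is not < start_range
def pvBsearch (s : List Char) (lo hi : Nat) : Nat :=
  if _ : lo < hi then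
    let mid := (lo + hi) / 2
    if pvStrLt (pvEncB 5 mid []) s then pvBsearch s (mid + 1) hi else pvBsearch s lo mid
  else lo
termination_by hi - lo
decreasing_by all_goals omega

-- Source B's collection loop (fuel = total - i)
def pvBLoop (e : List Char) (m : Int) : Nat → Nat → Int → List String
  | 0, _, _ => []
  | fuel + 1, i, count =>
    let slug := pvEncB 5 i []
    if pvStrLt e slug then []
    else String.ofList slug ::
      (if m ≤ count + 1 then [] else pvBLoop e m fuel (i + 1) (count + 1))

def generate_range_slugs_alt (start_range : String) (end_range : String) (max_count : Int) : List String :=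
  let i0 := pvBsearch start_range.toList 0 60466176
  pvBLoop end_range.toList max_count (60466176 - i0) i0 0

-- ===== PRECONDITION & SPEC =====
def Spec_generate_range_slugs (start_range : String) (end_range : String) (max_count : Int) (out : List String) : Prop := out = generate_range_slugs_alt start_range end_range max_count
instance (start_range : String) (end_range : String) (max_count : Int) (out : List String) : Decidable (Spec_generate_range_slugs start_range end_range max_count out) := by unfold Spec_generate_range_slugs; infer_instance

-- ===== CLAIM (what is proved, stated in full; the proofs are below) =====
def Claim_equal_generate_range_slugs : Prop := ∀ (start_range : String) (end_range : String) (max_count : Int), Dom_generate_range_slugs start_range end_range max_count → Spec_generate_range_slugs start_range end_range max_count (generate_range_slugs start_range end_range max_count)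

-- ===== LEMMAS AND PROOFS =====

-- B's divmod encoding produces exactly A's digit formula
lemma pvEncB_eq (i : Nat) : pvEncB 5 i [] = pvEncode i := by
  simp [pvEncB, pvEncode, Nat.div_div_eq_div_mul]

lemma pvChar36_toNat (d : Nat) (h : d < 36) :
    (pvChar36 d).toNat = if d < 10 then 48 + d else 87 + d := by
  unfold pvChar36
  split_ifs with h1
  · have hv : Nat.isValidChar (48 + d) := Or.inl (by omega)
    simp [Char.ofNat, hv, Char.toNat, Char.ofNatAux]
    omega
  · have hv : Nat.isValidChar (87 + d) := Or.inl (by omega)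
    simp [Char.ofNat, hv, Char.toNat, Char.ofNatAux]
    omega

lemma pvChar36_lt_iff : ∀ d1, d1 < 36 → ∀ d2, d2 < 36 →
    ((pvChar36 d1).toNat < (pvChar36 d2).toNat ↔ d1 < d2) := by
  intro d1 h1 d2 h2
  rw [pvChar36_toNat d1 h1, pvChar36_toNat d2 h2]
  split_ifs <;> omega

-- slugs are enumerated in strictly increasing string order
lemma pvLtEnc (i j : Nat) (hij : i < j) (hj : j < 60466176) :
    pvStrLt (pvEncode i) (pvEncode j) = true := by
  have hi : i < 60466176 := by omega
  simp only [pvEncode, pvStrLt,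
    pvChar36_lt_iff _ (Nat.mod_lt _ (by norm_num)) _ (Nat.mod_lt _ (by norm_num))]
  split_ifs <;> first | rfl | omega

lemma pvStrLt_trans : ∀ a b c : List Char,
    pvStrLt a b = true → pvStrLt b c = true → pvStrLt a c = true := by
  intro a
  induction a with
  | nil =>
    intro b c h1 h2
    cases b with
    | nil => cases c <;> simp_all [pvStrLt]
    | cons y ys =>
      cases c with
      | nil => simp_all [pvStrLt]
      | cons z zs => simp [pvStrLt]
  | cons x xs ih =>
    intro b c h1 h2
    cases b with
    | nil => simp_all [pvStrLt]
    | cons y ys =>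
      cases c with
      | nil => simp_all [pvStrLt]
      | cons z zs =>
        simp only [pvStrLt] at h1 h2 ⊢
        split_ifs at h1 h2 ⊢ <;> first | rfl | omega | exact ih ys zs h1 h2

-- "slug < start" is downward closed along the enumeration …
lemma pvPtrue_mono (s : List Char) (k j : Nat) (hkj : k ≤ j) (hj : j < 60466176)
    (h : pvStrLt (pvEncode j) s = true) : pvStrLt (pvEncode k) s = true := by
  rcases Nat.lt_or_ge k j with hlt | hge
  · exact pvStrLt_trans _ _ _ (pvLtEnc k j hlt hj) h
  · have : k = j := by omega
    rw [this]; exact h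

-- … and "slug ≥ start" is upward closed
lemma pvPfalse_mono (s : List Char) (i k : Nat) (hik : i ≤ k) (hk : k < 60466176)
    (h : pvStrLt (pvEncode i) s = false) : pvStrLt (pvEncode k) s = false := by
  cases hpk : pvStrLt (pvEncode k) s with
  | false => rfl
  | true => rw [pvPtrue_mono s i k hik hk hpk] at h; cases h

lemma pvBsearch_step (s : List Char) (lo hi : Nat) (h : lo < hi) :
    pvBsearch s lo hi = if pvStrLt (pvEncode ((lo + hi) / 2)) s
      then pvBsearch s ((lo + hi) / 2 + 1) hi else pvBsearch s lo ((lo + hi) / 2) := by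
  rw [pvBsearch]
  simp [h, pvEncB_eq]

lemma pvBsearch_stop (s : List Char) (lo hi : Nat) (h : ¬ lo < hi) :
    pvBsearch s lo hi = lo := by
  rw [pvBsearch]
  simp [h]

-- the binary search splits the enumeration at the first slug ≥ start
lemma pvBsearch_spec (s : List Char) : ∀ n lo hi, hi - lo = n → lo ≤ hi → hi ≤ 60466176 →
    (∀ k, k < lo → pvStrLt (pvEncode k) s = true) →
    (∀ k, hi ≤ k → k < 60466176 → pvStrLt (pvEncode k) s = false) →
    (lo ≤ pvBsearch s lo hi ∧ pvBsearch s lo hi ≤ hi) ∧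
    (∀ k, k < pvBsearch s lo hi → pvStrLt (pvEncode k) s = true) ∧
    (∀ k, pvBsearch s lo hi ≤ k → k < 60466176 → pvStrLt (pvEncode k) s = false) := by
  intro n
  induction n using Nat.strong_induction_on with
  | _ n ih =>
    intro lo hi hn hlohi hhi hL hH
    by_cases h : lo < hi
    · rw [pvBsearch_step s lo hi h]
      have hmidlt : (lo + hi) / 2 < 60466176 := by omega
      cases hm : pvStrLt (pvEncode ((lo + hi) / 2)) s with
      | true =>
        rw [if_pos rfl]
        have hrec := ih (hi - ((lo + hi) / 2 + 1)) (by omega) ((lo + hi) / 2 + 1) hi rfl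
          (by omega) hhi
          (fun k hk => pvPtrue_mono s k ((lo + hi) / 2) (by omega) hmidlt hm) hH
        exact ⟨⟨by omega, hrec.1.2⟩, hrec.2⟩
      | false =>
        rw [if_neg (by simp)]
        have hrec := ih ((lo + hi) / 2 - lo) (by omega) lo ((lo + hi) / 2) rfl
          (by omega) (by omega) hL
          (fun k hk hk2 => pvPfalse_mono s ((lo + hi) / 2) k hk hk2 hm)
        exact ⟨⟨hrec.1.1, by omega⟩, hrec.2⟩
    · rw [pvBsearch_stop s lo hi h]
      have : lo = hi := by omega
      exact ⟨⟨le_refl _, by omega⟩, hL, fun k hk hk2 => hH k (this ▸ hk) hk2⟩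

-- A's loop skips every slug below the range start
lemma pvSkip (s e : List Char) (m : Int) (count : Int) :
    ∀ d i, i + d ≤ 60466176 →
    (∀ k, i ≤ k → k < i + d → pvStrLt (pvEncode k) s = true) →
    pvALoop s e m (60466176 - i) i count = pvALoop s e m (60466176 - (i + d)) (i + d) count := by
  intro d
  induction d with
  | zero => intro i _ _; rfl
  | succ d ihd =>
    intro i hle h
    have hi : i < 60466176 := by omega
    have hfuel : 60466176 - i = (60466176 - (i + 1)) + 1 := by omega
    rw [hfuel]
    have hstep : pvALoop s e m ((60466176 - (i + 1)) + 1) i count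
        = pvALoop s e m (60466176 - (i + 1)) (i + 1) count := by
      simp [pvALoop, h i (le_refl _) (by omega)]
    rw [hstep]
    have := ihd (i + 1) (by omega) (fun k hk1 hk2 => h k (by omega) (by omega))
    rw [this]
    congr 1 <;> omega

-- past the range start the two loops coincide step by step
lemma pvTail (s e : List Char) (m : Int) :
    ∀ fuel i count, (∀ k, i ≤ k → k < i + fuel → pvStrLt (pvEncode k) s = false) →
    pvALoop s e m fuel i count = pvBLoop e m fuel i count := by
  intro fuel
  induction fuel with
  | zero => intro i count _; rfl
  | succ fuel ihf =>
    intro i count h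
    have hPi : pvStrLt (pvEncode i) s = false := h i (le_refl _) (by omega)
    simp only [pvALoop, pvBLoop, pvEncB_eq, hPi, Bool.false_eq_true, if_false]
    by_cases he : pvStrLt e (pvEncode i) = true
    · simp [he]
    · simp only [Bool.not_eq_true] at he
      simp only [he, Bool.false_eq_true, if_false]
      by_cases hc : m ≤ count + 1
      · simp [hc]
      · simp only [if_neg hc]
        rw [ihf (i + 1) (count + 1) (fun k hk1 hk2 => h k (by omega) (by omega))]

-- ===== VERDICT (by name: the statement is the Claim_ definition above) =====
theorem generate_range_slugs_spec : Claim_equal_generate_range_slugs := by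
  unfold Claim_equal_generate_range_slugs Spec_generate_range_slugs
  intro s e m _
  unfold generate_range_slugs generate_range_slugs_alt
  obtain ⟨⟨_, hub⟩, hT, hF⟩ := pvBsearch_spec s.toList 60466176 0 60466176 rfl (by omega)
    (le_refl _) (fun k hk => absurd hk (by omega)) (fun k hk hk2 => absurd hk2 (by omega))
  have h1 := pvSkip s.toList e.toList m 0 (pvBsearch s.toList 0 60466176) 0
    (by omega) (fun k hk1 hk2 => hT k (by omega))
  simp only [Nat.zero_add, Nat.sub_zero] at h1
  rw [h1]
  exact pvTail s.toList e.toList m _ _ 0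
    (fun k hk1 hk2 => hF k hk1 (by omega))
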